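-- pv_equiv track=rewrite | github.com/Anubhob435/pythonFiles | AdobeHackathonDSAround/LisaAndTheo.py | solve
-- ===== SOURCE A (Python) =====
-- def can_pick(sequence, gem_value):
--     if len(sequence) == 0:
--         return True
--     return gem_value > sequence[-1]
--
-- def solve(gems, lila_sequence, theo_sequence, is_lila_turn):
--     if len(gems) == 0:
--         return not is_lila_turn
--
--     left_gem = gems[0]
--     right_gem = gems[-1]
--
--     can_pick_left = False
--     can_pick_right = False
--
--     if is_lila_turn:
--         can_pick_left = can_pick(lila_sequence, left_gem)
--         can_pick_right = can_pick(lila_sequence, right_gem)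
--     else:
--         can_pick_left = can_pick(theo_sequence, left_gem)
--         can_pick_right = can_pick(theo_sequence, right_gem)
--
--     if not can_pick_left and not can_pick_right:
--         return not is_lila_turn
--
--     results = []
--
--     if can_pick_left:
--         new_gems = gems[1:]
--         if is_lila_turn:
--             new_lila = lila_sequence + [left_gem]
--             result = solve(new_gems, new_lila, theo_sequence, False)
--         else:
--             new_theo = theo_sequence + [left_gem]
--             result = solve(new_gems, lila_sequence, new_theo, True)
--         results.append(result)
--
--     if can_pick_right:
--         new_gems = gems[:-1]
--         if is_lila_turn:
--             new_lila = lila_sequence + [right_gem]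
--             result = solve(new_gems, new_lila, theo_sequence, False)
--         else:
--             new_theo = theo_sequence + [right_gem]
--             result = solve(new_gems, lila_sequence, new_theo, True)
--         results.append(result)
--
--     if is_lila_turn:
--         return any(results)
--     else:
--         return all(results)
-- ===== SOURCE B (Python) =====
-- from functools import lru_cache
--
-- @lru_cache(maxsize=None)
-- def _win(g, last_lila, last_theo, turn):
--     if not g:
--         return not turn
--     last = last_lila if turn else last_theo
--     moves = []
--     if last is None or g[0] > last:
--         moves.append(_win(g[1:], g[0], last_theo, False) if turn
--                      else _win(g[1:], last_lila, g[0], True))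
--     if last is None or g[-1] > last:
--         moves.append(_win(g[:-1], g[-1], last_theo, False) if turn
--                      else _win(g[:-1], last_lila, g[-1], True))
--     if not moves:
--         return not turn
--     return any(moves) if turn else all(moves)
--
-- def solve(gems, lila_sequence, theo_sequence, is_lila_turn):
--     # the recursion only ever inspects the LAST element of each sequence,
--     # so reduce the state to (gems, last_lila, last_theo, turn) and memoize it
--     last_lila = lila_sequence[-1] if lila_sequence else None
--     last_theo = theo_sequence[-1] if theo_sequence else None
--     return _win(tuple(gems), last_lila, last_theo, bool(is_lila_turn))
-- ===== Notes on version B (the rewrite author's own statement) =====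
-- stated objective: alternative
-- what changed: B observes that the recursion only ever reads the LAST element of each player's pick-sequence, so it recurses on the reduced state (remaining gems, last lila pick, last theo pick, turn) and memoizes that state with lru_cache instead of carrying the ever-growing sequence lists.
import Mathlib
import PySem

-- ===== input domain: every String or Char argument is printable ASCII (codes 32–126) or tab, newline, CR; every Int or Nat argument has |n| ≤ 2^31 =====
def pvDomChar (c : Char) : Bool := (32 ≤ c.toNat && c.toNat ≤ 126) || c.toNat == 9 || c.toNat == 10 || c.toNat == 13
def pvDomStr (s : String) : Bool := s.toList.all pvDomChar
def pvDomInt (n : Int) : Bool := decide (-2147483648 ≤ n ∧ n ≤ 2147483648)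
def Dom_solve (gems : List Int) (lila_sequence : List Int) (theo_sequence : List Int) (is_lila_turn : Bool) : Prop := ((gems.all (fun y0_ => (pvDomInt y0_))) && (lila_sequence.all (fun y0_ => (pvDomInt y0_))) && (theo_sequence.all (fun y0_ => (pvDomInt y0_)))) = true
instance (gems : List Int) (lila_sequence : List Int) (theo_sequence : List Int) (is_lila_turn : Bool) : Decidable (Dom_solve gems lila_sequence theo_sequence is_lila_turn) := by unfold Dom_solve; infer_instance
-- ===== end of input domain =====

-- B replaces A's recursion carrying whole pick-sequences by a memoized recursion
-- whose state keeps only each player's LAST pick (objective: alternative).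

-- ===== PORT A =====
def can_pick (sequence : List Int) (gem_value : Int) : Bool :=
  if sequence.length = 0 then true
  else decide (gem_value > PySem.List.pyGetD sequence (-1) 0)

def solve (gems : List Int) (lila_sequence : List Int) (theo_sequence : List Int) (is_lila_turn : Bool) : Bool :=
  if _h : gems.length = 0 then !is_lila_turn
  else
    let left_gem := PySem.List.pyGetD gems 0 0
    let right_gem := PySem.List.pyGetD gems (-1) 0
    let can_pick_left := if is_lila_turn then can_pick lila_sequence left_gem else can_pick theo_sequence left_gem
    let can_pick_right := if is_lila_turn then can_pick lila_sequence right_gem else can_pick theo_sequence right_gem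
    if !can_pick_left && !can_pick_right then !is_lila_turn
    else
      let results : List Bool := []
      let results := if can_pick_left then
          results ++ [if is_lila_turn then
              solve (PySem.List.slice gems (some 1) none) (lila_sequence ++ [left_gem]) theo_sequence false
            else
              solve (PySem.List.slice gems (some 1) none) lila_sequence (theo_sequence ++ [left_gem]) true]
        else results
      let results := if can_pick_right then
          results ++ [if is_lila_turn then
              solve (PySem.List.slice gems none (some (-1))) (lila_sequence ++ [right_gem]) theo_sequence false
            else
              solve (PySem.List.slice gems none (some (-1))) lila_sequence (theo_sequence ++ [right_gem]) true]
        else results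
      if is_lila_turn then results.any id else results.all id
termination_by gems.length
decreasing_by
  all_goals simp_all [PySem.List.slice_from_one, PySem.List.slice_to_neg_one, List.length_tail, List.length_dropLast]
  all_goals cases gems <;> simp_all

-- ===== PORT B =====
-- memoized Python helper _win: in Lean the same recursion without the cache
def pyWin (g : List Int) (last_lila : Option Int) (last_theo : Option Int) (turn : Bool) : Bool :=
  if _hg : g.isEmpty then !turn
  else
    let last := if turn then last_lila else last_theo
    let first := g.headD 0
    let lastG := g.getLastD 0
    let moves : List Bool :=
      (if (match last with | none => true | some x => decide (first > x)) then
         [if turn then pyWin (g.drop 1) (some first) last_theo false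
          else pyWin (g.drop 1) last_lila (some first) true] else []) ++
      (if (match last with | none => true | some x => decide (lastG > x)) then
         [if turn then pyWin g.dropLast (some lastG) last_theo false
          else pyWin g.dropLast last_lila (some lastG) true] else [])
    if moves.isEmpty then !turn
    else if turn then moves.any id else moves.all id
termination_by g.length
decreasing_by
  all_goals simp_all [List.isEmpty_iff, List.length_dropLast]
  all_goals cases g <;> simp_all

def solve_alt (gems : List Int) (lila_sequence : List Int) (theo_sequence : List Int) (is_lila_turn : Bool) : Bool :=
  let last_lila := if lila_sequence.isEmpty then none else some (lila_sequence.getLastD 0)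
  let last_theo := if theo_sequence.isEmpty then none else some (theo_sequence.getLastD 0)
  pyWin gems last_lila last_theo is_lila_turn

-- ===== PRECONDITION & SPEC =====
def Spec_solve (gems : List Int) (lila_sequence : List Int) (theo_sequence : List Int) (is_lila_turn : Bool) (out : Bool) : Prop := out = solve_alt gems lila_sequence theo_sequence is_lila_turn
instance (gems : List Int) (lila_sequence : List Int) (theo_sequence : List Int) (is_lila_turn : Bool) (out : Bool) : Decidable (Spec_solve gems lila_sequence theo_sequence is_lila_turn out) := by unfold Spec_solve; infer_instance

-- ===== CLAIM (what is proved, stated in full; the proofs are below) =====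
def Claim_equal_solve : Prop := ∀ (gems : List Int) (lila_sequence : List Int) (theo_sequence : List Int) (is_lila_turn : Bool), Dom_solve gems lila_sequence theo_sequence is_lila_turn → Spec_solve gems lila_sequence theo_sequence is_lila_turn (solve gems lila_sequence theo_sequence is_lila_turn)

-- ===== LEMMAS AND PROOFS =====

def lastOpt (s : List Int) : Option Int :=
  if s.isEmpty then none else some (s.getLastD 0)

theorem can_pick_lastOpt (s : List Int) (v : Int) :
    can_pick s v = (match lastOpt s with | none => true | some x => decide (v > x)) := by
  cases s with
  | nil => simp [can_pick, lastOpt]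
  | cons a r =>
    have hne : (a :: r : List Int) ≠ [] := by simp
    simp [can_pick, lastOpt, PySem.List.pyGetD_neg_one (a :: r) 0 hne,
      List.getLastD_eq_getLast?, List.getLast?_eq_some_getLast hne]

theorem lastOpt_append_singleton (s : List Int) (x : Int) :
    lastOpt (s ++ [x]) = some x := by
  simp [lastOpt]

theorem solve_eq_pyWin : ∀ (n : Nat) (gems : List Int), gems.length ≤ n → ∀ (lila theo : List Int) (t : Bool),
    solve gems lila theo t = pyWin gems (lastOpt lila) (lastOpt theo) t := by
  intro n
  induction n with
  | zero =>
    intro gems h lila theo t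
    have hnil : gems = [] := List.eq_nil_of_length_eq_zero (Nat.le_zero.mp h)
    subst hnil; simp [solve, pyWin]
  | succ n ih =>
    intro gems h lila theo t
    cases gems with
    | nil => simp [solve, pyWin]
    | cons a r =>
      have hr : r.length ≤ n := by simp at h; omega
      have hd : (a :: r).dropLast.length ≤ n := by simp at h ⊢; omega
      rw [solve, pyWin]
      have e1 : PySem.List.slice (a :: r) (some 1) none = r := by
        simp [PySem.List.slice_from_one]
      have e2 : PySem.List.slice (a :: r) none (some (-1)) = (a :: r).dropLast := by
        simp [PySem.List.slice_to_neg_one]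
      have hne : (a :: r : List Int) ≠ [] := by simp
      have e4 : PySem.List.pyGetD (a :: r) (-1) 0 = (a :: r).getLastD 0 := by
        rw [PySem.List.pyGetD_neg_one _ 0 hne]
        simp [List.getLastD_eq_getLast?, List.getLast?_eq_some_getLast hne]
      simp only [e1, e2, e4, PySem.List.pyGetD_zero_cons, can_pick_lastOpt,
        lastOpt_append_singleton, ih r hr, ih _ hd, List.length_cons,
        List.isEmpty_cons, List.headD_cons]
      cases t
      · cases hlt : lastOpt theo with
        | none => simp
        | some x =>
          by_cases h1 : x < a <;> by_cases h2 : x < (a :: r).getLast?.getD 0 <;>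
            simp [h1, h2, List.getLastD_eq_getLast?]
      · cases hll : lastOpt lila with
        | none => simp
        | some x =>
          by_cases h1 : x < a <;> by_cases h2 : x < (a :: r).getLast?.getD 0 <;>
            simp [h1, h2, List.getLastD_eq_getLast?]

-- ===== VERDICT (by name: the statement is the Claim_ definition above) =====
theorem solve_spec : Claim_equal_solve := by
  intro gems lila theo t _
  unfold Spec_solve solve_alt
  simpa [lastOpt] using solve_eq_pyWin gems.length gems le_rfl lila theo t
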